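-- pv_equiv track=rewrite | github.com/tmacdou4/AdventOfCode2020 | 13-2.py | lcm_offset
-- ===== SOURCE A (Python) =====
-- def lcm_offset(a, a_off, b, b_off):
--
--     og_a = a
--     og_b = b
--
--     while ((a-a_off) != (b-b_off)):
--         if a-a_off > b-b_off:
--             while a-a_off > b-b_off:
--                 b = b + og_b
--         elif b-b_off > a-a_off:
--             while b-b_off > a-a_off:
--                 a = a + og_a
--
--     return a
-- ===== SOURCE B (Python) =====
-- def lcm_offset(a, a_off, b, b_off):
--     # Extended Euclid: g = gcd(a, b), with a*u + b*v = g (v not tracked)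
--     old_r, r = a, b
--     old_s, s = 1, 0
--     while r != 0:
--         q = old_r // r
--         old_r, r = r, old_r - q * r
--         old_s, s = s, old_s - q * s
--     g, u = old_r, old_s
--     L = a // g * b                       # lcm(a, b)
--     # t0 solves t ≡ -a_off (mod a), t ≡ -b_off (mod b)
--     t0 = -a_off + a * u * ((a_off - b_off) // g)
--     M = max(a - a_off, b - b_off)
--     t = M + (t0 - M) % L                 # smallest solution ≥ M
--     return t + a_off
-- ===== Notes on version B (the rewrite author's own statement) =====
-- stated objective: faster
-- what changed: Replaces A's step-by-step chase of the two arithmetic progressions with extended Euclid + CRT: solve the two congruences directly and pick the smallest solution at or above the starting point with one mod operation.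
-- outside the precondition, e.g. on lcm_offset(0, 3, 0, 3): A returns 0, B raises ZeroDivisionError; on lcm_offset(-3, -6, 1, 0): A returns -3, B returns -3
import Mathlib
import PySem

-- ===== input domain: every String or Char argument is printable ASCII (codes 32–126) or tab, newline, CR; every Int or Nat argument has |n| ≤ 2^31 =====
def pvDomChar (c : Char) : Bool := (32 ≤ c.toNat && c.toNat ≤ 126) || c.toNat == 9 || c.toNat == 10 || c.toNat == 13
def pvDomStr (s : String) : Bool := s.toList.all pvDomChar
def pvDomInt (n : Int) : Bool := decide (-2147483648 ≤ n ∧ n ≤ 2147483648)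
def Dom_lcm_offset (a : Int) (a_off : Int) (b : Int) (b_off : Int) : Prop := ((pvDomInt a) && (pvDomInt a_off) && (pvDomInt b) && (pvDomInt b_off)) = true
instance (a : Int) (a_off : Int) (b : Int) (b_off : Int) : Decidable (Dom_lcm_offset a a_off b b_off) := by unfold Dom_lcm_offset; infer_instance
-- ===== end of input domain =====

-- B replaces A's step-by-step chase of the two arithmetic progressions by extended Euclid / CRT,
-- solving the congruences directly (asymptotically faster; equivalence proved on Pre_ below).

-- ===== PORT A =====
-- inner Python loop 'while cur - off < target: cur += step'; the '1 ≤ step' conjunct only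
-- totalises the recursion (Python diverges when step ≤ 0; such inputs are outside Pre_)
def chaseInner (step off target cur : Int) : Int :=
  if _h : 1 ≤ step ∧ cur - off < target then chaseInner step off target (cur + step) else cur
termination_by (target - (cur - off)).toNat
decreasing_by omega

-- outer Python 'while (a-a_off) != (b-b_off)' loop; fuel only totalises it (Python diverges
-- when the congruences have no common solution; such inputs are outside Pre_)
def chaseOuter (fuel : Nat) (og_a og_b a_off b_off a b : Int) : Int :=
  match fuel with
  | 0 => a
  | n+1 =>
    if a - a_off ≠ b - b_off then
      if a - a_off > b - b_off then
        chaseOuter n og_a og_b a_off b_off a (chaseInner og_b b_off (a - a_off) b)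
      else if b - b_off > a - a_off then
        chaseOuter n og_a og_b a_off b_off (chaseInner og_a a_off (b - b_off) a) b
      else
        chaseOuter n og_a og_b a_off b_off a b
    else a

def lcm_offset (a : Int) (a_off : Int) (b : Int) (b_off : Int) : Int :=
  chaseOuter (2 ^ 80) a b a_off b_off a b

-- ===== PORT B =====
-- extended-Euclid loop of Source B: state (old_r, r, old_s, s); fuel only totalises it
def egcdLoop (fuel : Nat) (or_ r os s : Int) : Int × Int :=
  match fuel with
  | 0 => (or_, os)
  | n+1 =>
    if r ≠ 0 then
      let q := PySem.Int.floordiv or_ r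
      egcdLoop n r (or_ - q * r) s (os - q * s)
    else (or_, os)

def lcm_offset_alt (a : Int) (a_off : Int) (b : Int) (b_off : Int) : Int :=
  let gu := egcdLoop (a.natAbs + b.natAbs + 1) a b 1 0
  let g := gu.1
  let u := gu.2
  let L := PySem.Int.floordiv a g * b
  let t0 := -a_off + a * u * (PySem.Int.floordiv (a_off - b_off) g)
  let M := max (a - a_off) (b - b_off)
  let t := M + PySem.Int.mod (t0 - M) L
  t + a_off

-- ===== PRECONDITION & SPEC =====
-- Pre_ excludes non-positive periods and unsolvable congruences: there Python A loops forever
-- except on degenerate inputs that start or accidentally land on a meeting point, where B's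
-- divisions by gcd/lcm can hit zero (ZeroDivisionError) or match only by accident.
def Pre_lcm_offset (a : Int) (a_off : Int) (b : Int) (b_off : Int) : Prop :=
  1 ≤ a ∧ 1 ≤ b ∧ (Int.gcd a b : Int) ∣ (a_off - b_off)
instance (a : Int) (a_off : Int) (b : Int) (b_off : Int) : Decidable (Pre_lcm_offset a a_off b b_off) := by unfold Pre_lcm_offset; infer_instance

def pvWitness_lcm_offset : Int × Int × Int × Int := (7, 0, 13, 1)

def Spec_lcm_offset (a : Int) (a_off : Int) (b : Int) (b_off : Int) (out : Int) : Prop := out = lcm_offset_alt a a_off b b_off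
instance (a : Int) (a_off : Int) (b : Int) (b_off : Int) (out : Int) : Decidable (Spec_lcm_offset a a_off b b_off out) := by unfold Spec_lcm_offset; infer_instance

-- ===== CLAIM (what is proved, stated in full; the proofs are below) =====
def Claim_equal_lcm_offset : Prop := ∀ (a : Int) (a_off : Int) (b : Int) (b_off : Int), Dom_lcm_offset a a_off b b_off → Pre_lcm_offset a a_off b b_off → Spec_lcm_offset a a_off b b_off (lcm_offset a a_off b b_off)

-- ===== LEMMAS AND PROOFS =====

-- extended Euclid: the loop returns (gcd a b, u) with a*u + b*v = gcd for some v
lemma egcdLoop_spec (a b : Int) : ∀ (fuel : Nat) (or_ r os s : Int),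
    1 ≤ or_ → 0 ≤ r → r.toNat < fuel →
    Int.gcd or_ r = Int.gcd a b →
    (∃ v, or_ = a * os + b * v) → (∃ v, r = a * s + b * v) →
    (egcdLoop fuel or_ r os s).1 = (Int.gcd a b : Int) ∧
    ∃ v, (egcdLoop fuel or_ r os s).1 = a * (egcdLoop fuel or_ r os s).2 + b * v := by
  intro fuel
  induction fuel with
  | zero => intro or_ r os s _ _ hf; omega
  | succ n ih =>
    intro or_ r os s hor hr hf hgcd hB1 hB2
    by_cases hr0 : r = 0
    · subst hr0
      simp only [egcdLoop, ne_eq, not_true_eq_false, if_false]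
      constructor
      · simp only [Int.gcd, Int.natAbs_zero, Nat.gcd_zero_right] at hgcd
        unfold Int.gcd
        rw [← hgcd]; omega
      · exact hB1
    · have hrpos : 0 < r := lt_of_le_of_ne hr (Ne.symm hr0)
      simp only [egcdLoop, ne_eq, hr0, not_false_eq_true, if_true]
      have hq : PySem.Int.floordiv or_ r = or_ / r := PySem.Int.floordiv_eq_ediv_of_pos hrpos
      have hrem : or_ - PySem.Int.floordiv or_ r * r = or_ % r := by
        rw [hq, Int.emod_def]; ring
      rw [hrem]
      have hmod0 : 0 ≤ or_ % r := Int.emod_nonneg or_ hr0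
      have hmodlt : or_ % r < r := Int.emod_lt_of_pos or_ hrpos
      apply ih
      · omega
      · exact hmod0
      · omega
      · rw [← hgcd, Int.gcd_comm r (or_ % r), Int.gcd_emod]
      · exact hB2
      · obtain ⟨v1, hv1⟩ := hB1
        obtain ⟨v2, hv2⟩ := hB2
        refine ⟨v1 - PySem.Int.floordiv or_ r * v2, ?_⟩
        rw [Int.emod_def, hq]
        linear_combination hv1 - (or_ / r) * hv2

-- inner chase loop: stays ≤ t, ends ≥ target, preserves the congruence mod step
lemma chaseInner_spec (step off target t : Int) (hstep : 1 ≤ step) (htar : target ≤ t) :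
    ∀ cur : Int, cur - off ≤ t → step ∣ (t + off - cur) →
    cur ≤ chaseInner step off target cur ∧
    target ≤ chaseInner step off target cur - off ∧
    chaseInner step off target cur - off ≤ t ∧
    step ∣ (t + off - chaseInner step off target cur) := by
  intro cur
  induction cur using chaseInner.induct step off target with
  | case1 cur h ih =>
    intro hle hdvd
    have hnext : cur + step - off ≤ t := by
      have hpos : 0 < t + off - cur := by omega
      have := Int.le_of_dvd hpos hdvd
      omega
    have hdvd' : step ∣ (t + off - (cur + step)) := by
      obtain ⟨k, hk⟩ := hdvd
      exact ⟨k - 1, by linear_combination hk⟩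
    obtain ⟨h1, h2, h3, h4⟩ := ih hnext hdvd'
    rw [chaseInner, dif_pos h]
    exact ⟨by omega, h2, h3, h4⟩
  | case2 cur h =>
    intro hle hdvd
    rw [chaseInner, dif_neg h]
    have : ¬ cur - off < target := by
      intro hc; exact h ⟨hstep, hc⟩
    exact ⟨le_refl _, by omega, hle, hdvd⟩

-- outer chase loop: with both residues fixed and t the least common value, the loop returns t + a_off
lemma chaseOuter_spec (a b a_off b_off t : Int) (ha : 1 ≤ a) (hb : 1 ≤ b)
    (hta : a ∣ (t + a_off)) (htb : b ∣ (t + b_off))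
    (htlt : t < max (a - a_off) (b - b_off) + (Int.lcm a b : Int)) :
    ∀ (fuel : Nat) (a' b' : Int), a ∣ a' → b ∣ b' → a ≤ a' → b ≤ b' →
    a' - a_off ≤ t → b' - b_off ≤ t →
    (t - (a' - a_off)).toNat + (t - (b' - b_off)).toNat < fuel →
    chaseOuter fuel a b a_off b_off a' b' = t + a_off := by
  intro fuel
  induction fuel with
  | zero => intro a' b' _ _ _ _ _ _ hf; omega
  | succ n ih =>
    intro a' b' hda hdb hlea hleb hta' htb' hf
    by_cases heq : a' - a_off = b' - b_off
    · simp only [chaseOuter, ne_eq, heq, not_true_eq_false, if_false]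
      -- the common value a' - a_off must be exactly t
      have h1 : a ∣ (t - (a' - a_off)) := by
        obtain ⟨k1, hk1⟩ := hta; obtain ⟨k2, hk2⟩ := hda
        exact ⟨k1 - k2, by linear_combination hk1 - hk2⟩
      have h2 : b ∣ (t - (a' - a_off)) := by
        obtain ⟨k1, hk1⟩ := htb; obtain ⟨k2, hk2⟩ := hdb
        exact ⟨k1 - k2, by linear_combination hk1 - hk2 - heq⟩
      have hnonneg : 0 ≤ t - (a' - a_off) := by omega
      have hlcm : (Int.lcm a b : Int) ∣ (t - (a' - a_off)) := by
        have h1' : a ∣ ((t - (a' - a_off)).toNat : Int) := by rwa [Int.toNat_of_nonneg hnonneg]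
        have h2' : b ∣ ((t - (a' - a_off)).toNat : Int) := by rwa [Int.toNat_of_nonneg hnonneg]
        have hd := Int.lcm_dvd h1' h2'
        have : (Int.lcm a b : Int) ∣ ((t - (a' - a_off)).toNat : Int) := Int.natCast_dvd_natCast.mpr hd
        rwa [Int.toNat_of_nonneg hnonneg] at this
      have hsmall : |t - (a' - a_off)| < (Int.lcm a b : Int) := by
        rw [abs_of_nonneg hnonneg]
        have hm1 : a - a_off ≤ a' - a_off := by omega
        have hm2 : b - b_off ≤ a' - a_off := by omega
        have : max (a - a_off) (b - b_off) ≤ a' - a_off := max_le hm1 hm2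
        omega
      have := Int.eq_zero_of_abs_lt_dvd hlcm hsmall
      omega
    · simp only [chaseOuter, ne_eq, heq, not_false_eq_true, if_true]
      by_cases hgt : a' - a_off > b' - b_off
      · rw [if_pos hgt]
        have hdvd : b ∣ (t + b_off - b') := by
          obtain ⟨k1, hk1⟩ := htb; obtain ⟨k2, hk2⟩ := hdb
          exact ⟨k1 - k2, by linear_combination hk1 - hk2⟩
        obtain ⟨i1, i2, i3, i4⟩ := chaseInner_spec b b_off (a' - a_off) t hb (by omega) b' htb' hdvd
        set b'' := chaseInner b b_off (a' - a_off) b' with hb''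
        apply ih
        · exact hda
        · obtain ⟨k1, hk1⟩ := htb; obtain ⟨k2, hk2⟩ := i4
          exact ⟨k1 - k2, by linear_combination hk1 - hk2⟩
        · exact hlea
        · omega
        · exact hta'
        · exact i3
        · omega
      · rw [if_neg hgt, if_pos (by omega : b' - b_off > a' - a_off)]
        have hdvd : a ∣ (t + a_off - a') := by
          obtain ⟨k1, hk1⟩ := hta; obtain ⟨k2, hk2⟩ := hda
          exact ⟨k1 - k2, by linear_combination hk1 - hk2⟩
        obtain ⟨i1, i2, i3, i4⟩ := chaseInner_spec a a_off (b' - b_off) t ha (by omega) a' hta' hdvd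
        set a'' := chaseInner a a_off (b' - b_off) a' with ha''
        apply ih
        · obtain ⟨k1, hk1⟩ := hta; obtain ⟨k2, hk2⟩ := i4
          exact ⟨k1 - k2, by linear_combination hk1 - hk2⟩
        · exact hdb
        · omega
        · exact hleb
        · exact i3
        · exact htb'
        · omega

-- ===== VERDICT (by name: the statement is the Claim_ definition above) =====
theorem lcm_offset_spec : Claim_equal_lcm_offset := by
  intro a a_off b b_off hD hP
  obtain ⟨ha, hb, hdvd⟩ := hP
  simp only [Dom_lcm_offset, pvDomInt, Bool.and_eq_true, decide_eq_true_eq] at hD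
  obtain ⟨⟨⟨⟨hDa1, hDa2⟩, ⟨hDao1, hDao2⟩⟩, ⟨hDb1, hDb2⟩⟩, ⟨hDbo1, hDbo2⟩⟩ := hD
  unfold Spec_lcm_offset
  -- the extended-Euclid result of B
  have hegcd := egcdLoop_spec a b (a.natAbs + b.natAbs + 1) a b 1 0 ha (by omega)
      (by omega) rfl ⟨0, by ring⟩ ⟨1, by ring⟩
  set gu := egcdLoop (a.natAbs + b.natAbs + 1) a b 1 0 with hgu
  obtain ⟨hg1, v, hg2⟩ := hegcd
  set G := (Int.gcd a b : Int) with hG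
  have hGne : Int.gcd a b ≠ 0 := by
    intro h0
    have := Int.gcd_eq_zero_iff.mp h0
    omega
  have hGpos : 0 < G := by
    have h0 : 0 < Int.gcd a b := Nat.pos_of_ne_zero hGne
    rw [hG]; exact_mod_cast h0
  have hGdvda : G ∣ a := Int.gcd_dvd_left a b
  have hGdvdb : G ∣ b := Int.gcd_dvd_right a b
  -- abbreviations for B's intermediate values
  set k := PySem.Int.floordiv (a_off - b_off) gu.1 with hkdef
  set L := PySem.Int.floordiv a gu.1 * b with hLdef
  set t0 := -a_off + a * gu.2 * k with ht0def
  set M := max (a - a_off) (b - b_off) with hMdef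
  set t := M + PySem.Int.mod (t0 - M) L with htdef
  have halt : lcm_offset_alt a a_off b b_off = t + a_off := rfl
  have hfl : PySem.Int.floordiv a gu.1 = a / G := by
    rw [hg1]; exact PySem.Int.floordiv_eq_ediv_of_pos hGpos
  have hdivmul : a / G * G = a := Int.ediv_mul_cancel hGdvda
  have hLval : L = a / G * b := by rw [hLdef, hfl]
  have hdivpos : 0 < a / G := by nlinarith [hdivmul]
  have hLpos : 0 < L := by rw [hLval]; positivity
  have hGL : G * L = a * b := by rw [hLval]; linear_combination b * hdivmul
  have hLlcm : L = (Int.lcm a b : Int) := by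
    have hml : (Int.gcd a b : Int) * (Int.lcm a b : Int) = (a.natAbs : Int) * (b.natAbs : Int) := by
      exact_mod_cast congrArg (Nat.cast : Nat → Int) (Int.gcd_mul_lcm a b)
    have hna : (a.natAbs : Int) = a := by omega
    have hnb : (b.natAbs : Int) = b := by omega
    rw [hna, hnb, ← hG] at hml
    exact mul_left_cancel₀ (ne_of_gt hGpos) (by rw [hGL]; exact hml.symm)
  have hk : G * k = a_off - b_off := by
    rw [hkdef, hg1, PySem.Int.floordiv_eq_ediv_of_pos hGpos]
    exact Int.mul_ediv_cancel' hdvd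
  have hm : PySem.Int.mod (t0 - M) L = (t0 - M) % L := PySem.Int.mod_eq_emod_of_pos hLpos
  have hm0 : 0 ≤ (t0 - M) % L := Int.emod_nonneg _ (ne_of_gt hLpos)
  have hmlt : (t0 - M) % L < L := Int.emod_lt_of_pos _ hLpos
  have hMt : M ≤ t := by rw [htdef, hm]; omega
  have htlt : t < M + L := by rw [htdef, hm]; omega
  have hLt0 : L ∣ (t - t0) := by
    refine ⟨-((t0 - M) / L), ?_⟩
    rw [htdef, hm, Int.emod_def]
    ring
  have hadvdL : a ∣ L := by rw [hLlcm]; exact Int.dvd_lcm_left a b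
  have hbdvdL : b ∣ L := by rw [hLlcm]; exact Int.dvd_lcm_right a b
  have hta : a ∣ (t + a_off) := by
    have h1 : a ∣ (t - t0) := dvd_trans hadvdL hLt0
    have h2 : a ∣ (t0 + a_off) := ⟨gu.2 * k, by rw [ht0def]; ring⟩
    obtain ⟨x1, hx1⟩ := h1; obtain ⟨x2, hx2⟩ := h2
    exact ⟨x1 + x2, by linear_combination hx1 + hx2⟩
  have htb : b ∣ (t + b_off) := by
    have h1 : b ∣ (t - t0) := dvd_trans hbdvdL hLt0
    have h2 : b ∣ (t0 + b_off) := by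
      refine ⟨-(v * k), ?_⟩
      rw [ht0def]
      linear_combination -k * hg2 + k * hg1 + hk
    obtain ⟨x1, hx1⟩ := h1; obtain ⟨x2, hx2⟩ := h2
    exact ⟨x1 + x2, by linear_combination hx1 + hx2⟩
  -- numeric bounds for the fuel
  have hdivle : a / G ≤ a := Int.ediv_le_self G (by omega)
  have hLle : L ≤ a * b := by
    rw [hLval]
    exact mul_le_mul_of_nonneg_right hdivle (by omega)
  have hab : a * b ≤ 2 ^ 62 := by nlinarith
  have hMub : M ≤ 2 ^ 32 := by
    rw [hMdef]; apply max_le <;> omega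
  have hM1 : a - a_off ≤ M := le_max_left _ _
  have hM2 : b - b_off ≤ M := le_max_right _ _
  show chaseOuter (2 ^ 80) a b a_off b_off a b = lcm_offset_alt a a_off b b_off
  rw [halt]
  apply chaseOuter_spec a b a_off b_off t ha hb hta htb (by rw [← hLlcm, ← hMdef]; omega)
      (2 ^ 80) a b dvd_rfl dvd_rfl le_rfl le_rfl (by omega) (by omega)
  omega
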